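-- pv_equiv track=rewrite | github.com/DavidOop/MLex02 | test.py | circle_finder
-- ===== SOURCE A (Python) =====
-- def circle_finder(img):
--     c = 0
--     flag = False
--     for i in img[32:]:
--         if i > 7 and not flag:
--             flag = True
--             c += 1
--         elif i <= 7 and flag:
--             flag = False
--             c += 1
--     return int(c <= 8)
-- ===== SOURCE B (Python) =====
-- def circle_finder(img):
--     bits = '0' + ''.join('1' if x > 7 else '0' for x in img[32:])
--     c = bits.count('01') + bits.count('10')
--     return int(c <= 8)
-- ===== Notes on version B (the rewrite author's own statement) =====
-- stated objective: alternative
-- what changed: Replaces the sticky flag-and-counter state machine with an encode-then-search pass: the tail is encoded as a '0'/'1' bitstring with a '0' prepended, and the transition count is obtained as str.count('01') + str.count('10') on that string.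
import Mathlib
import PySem

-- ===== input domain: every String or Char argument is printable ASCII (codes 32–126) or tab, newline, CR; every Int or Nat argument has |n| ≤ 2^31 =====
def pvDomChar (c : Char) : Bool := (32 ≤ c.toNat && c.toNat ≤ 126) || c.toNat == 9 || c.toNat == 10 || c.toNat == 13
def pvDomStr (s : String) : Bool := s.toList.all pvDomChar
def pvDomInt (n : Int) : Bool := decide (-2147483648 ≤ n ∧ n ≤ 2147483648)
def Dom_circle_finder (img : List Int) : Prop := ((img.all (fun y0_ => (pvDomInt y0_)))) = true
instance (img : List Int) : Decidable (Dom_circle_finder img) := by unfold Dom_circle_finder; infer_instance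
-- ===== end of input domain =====

-- B replaces A's sticky flag state machine by encoding img[32:] as a '0'/'1'
-- bitstring (with a '0' prepended) and counting the substrings "01" and "10"
-- with str.count; same O(n) cost, a genuinely different, staged algorithm.


-- ===== PORT A =====
def circle_finder (img : List Int) : Int :=
  let r := (PySem.List.slice img (some 32) none).foldl
    (fun (st : Int × Bool) i =>
      if i > 7 ∧ ¬ st.2 then (st.1 + 1, true)
      else if i ≤ 7 ∧ st.2 then (st.1 + 1, false)
      else st) (0, false)
  if r.1 ≤ 8 then 1 else 0

-- ===== PORT B =====
-- bits = '0' + ''.join('1' if x > 7 else '0' for x in img[32:]); c = bits.count('01') + bits.count('10')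
def circle_finder_alt (img : List Int) : Int :=
  let bits : List Char :=
    '0' :: (PySem.List.slice img (some 32) none).map (fun x => if x > 7 then '1' else '0')
  let c : Nat := PySem.Chars.count bits ['0', '1'] + PySem.Chars.count bits ['1', '0']
  if (c : Int) ≤ 8 then 1 else 0

-- ===== PRECONDITION & SPEC =====
def Spec_circle_finder (img : List Int) (out : Int) : Prop := out = circle_finder_alt img
instance (img : List Int) (out : Int) : Decidable (Spec_circle_finder img out) := by unfold Spec_circle_finder; infer_instance

-- ===== CLAIM (what is proved, stated in full; the proofs are below) =====
def Claim_equal_circle_finder : Prop := ∀ (img : List Int), Dom_circle_finder img → Spec_circle_finder img (circle_finder img)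

-- ===== LEMMAS AND PROOFS =====

def pairCount (a b : Char) : List Char → Nat
  | x :: y :: t => (if x = a ∧ y = b then 1 else 0) + pairCount a b (y :: t)
  | _ => 0

theorem count_go_eq_pairCount (a b : Char) (hab : a ≠ b) :
    ∀ (fuel : Nat) (l : List Char) (acc : Nat), l.length ≤ fuel →
      PySem.Chars.count.go [a, b] fuel l acc = acc + pairCount a b l := by
  intro fuel
  induction fuel with
  | zero =>
    intro l acc h
    have : l = [] := List.length_eq_zero_iff.mp (Nat.le_zero.mp h)
    subst this; rfl
  | succ n ih =>
    intro l acc h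
    cases l with
    | nil => rfl
    | cons x t =>
      rw [PySem.Chars.count.go]
      by_cases hp : List.isPrefixOf [a, b] (x :: t) = true
      · rw [if_pos hp]
        cases t with
        | nil => simp [List.isPrefixOf] at hp
        | cons y t' =>
          obtain ⟨h1, h2⟩ : a = x ∧ b = y := by
            simp [List.isPrefixOf] at hp; exact hp
          subst h1; subst h2
          have hlen : t'.length ≤ n := by simp at h; omega
          rw [show List.drop (List.length [a, b]) (a :: b :: t') = t' from rfl,
              ih t' (acc + 1) hlen]
          have e1 : pairCount a b (a :: b :: t') = 1 + pairCount a b (b :: t') := by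
            simp [pairCount]
          have e2 : pairCount a b (b :: t') = pairCount a b t' := by
            cases t' with
            | nil => rfl
            | cons z t'' => simp [pairCount, hab.symm]
          rw [e1, e2]; omega
      · rw [if_neg hp]
        have hlen : t.length ≤ n := by simp at h; omega
        rw [ih t acc hlen]
        have e : pairCount a b (x :: t) = pairCount a b t := by
          cases t with
          | nil => rfl
          | cons y t' =>
            have hne : ¬ (x = a ∧ y = b) := by
              rintro ⟨rfl, rfl⟩
              simp [List.isPrefixOf] at hp
            simp [pairCount, hne]
        rw [e]


theorem count_pair_eq (a b : Char) (hab : a ≠ b) (l : List Char) :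
    PySem.Chars.count l [a, b] = pairCount a b l := by
  rw [PySem.Chars.count]
  simp only [List.isEmpty_cons, if_false, Bool.false_eq_true]
  rw [count_go_eq_pairCount a b hab l.length l 0 le_rfl]
  omega

theorem cf_foldl_eq (l : List Int) : ∀ (c : Int) (flag : Bool),
    (l.foldl (fun (st : Int × Bool) i =>
      if i > 7 ∧ ¬ st.2 then (st.1 + 1, true)
      else if i ≤ 7 ∧ st.2 then (st.1 + 1, false)
      else st) (c, flag)).1
    = c + pairCount '0' '1' ((if flag then '1' else '0') :: l.map (fun x => if x > 7 then '1' else '0'))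
        + pairCount '1' '0' ((if flag then '1' else '0') :: l.map (fun x => if x > 7 then '1' else '0')) := by
  induction l with
  | nil => intro c flag; simp [pairCount]
  | cons x xs ih =>
    intro c flag
    simp only [List.foldl_cons, List.map_cons]
    by_cases hx : x > 7
    · rw [show (if x > 7 then '1' else '0') = '1' from if_pos hx]
      cases flag
      · rw [show (if x > 7 ∧ ¬ (false : Bool) then (c + 1, true)
            else if x ≤ 7 ∧ (false : Bool) then (c + 1, false) else (c, false)) = (c + 1, true)
            from by simp [hx]]
        rw [ih]
        simp [pairCount]
        omega
      · rw [show (if x > 7 ∧ ¬ (true : Bool) then (c + 1, true)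
            else if x ≤ 7 ∧ (true : Bool) then (c + 1, false) else (c, true)) = (c, true)
            from by simp [hx, show ¬ x ≤ 7 from by omega]]
        rw [ih]
        simp [pairCount]
    · rw [show (if x > 7 then '1' else '0') = '0' from if_neg hx]
      cases flag
      · rw [show (if x > 7 ∧ ¬ (false : Bool) then (c + 1, true)
            else if x ≤ 7 ∧ (false : Bool) then (c + 1, false) else (c, false)) = (c, false)
            from by simp [hx]]
        rw [ih]
        simp [pairCount]
      · rw [show (if x > 7 ∧ ¬ (true : Bool) then (c + 1, true)
            else if x ≤ 7 ∧ (true : Bool) then (c + 1, false) else (c, true)) = (c + 1, false)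
            from by simp [hx, show x ≤ 7 from by omega]]
        rw [ih]
        simp [pairCount]
        omega

-- ===== VERDICT (by name: the statement is the Claim_ definition above) =====
theorem circle_finder_spec : Claim_equal_circle_finder := by
  intro img _
  unfold Spec_circle_finder circle_finder circle_finder_alt
  simp only [count_pair_eq '0' '1' (by decide), count_pair_eq '1' '0' (by decide), cf_foldl_eq]
  push_cast
  norm_num
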